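-- pv_equiv track=rewrite | github.com/fast-crypto-lab/Frobenius_AFFT | affft.py | nbc
-- ===== SOURCE A (Python) =====
-- def nbc(n):
--     if n==1:
--         return 0
--     if n==0:
--         return 0
--     d = 0
--     while 2**(d+1) <n:
--         d=d+1
--     m = 2**d
--     """
--     x^{2^m}+x
--     """
--     ret =  nbc(n-m)+nbc(m)+n-m
--     return ret
-- ===== SOURCE B (Python) =====
-- def nbc(n):
--     # Closed form nbc(2^b) = b*2^(b-1): strip bits high-to-low in O(log n) steps.
--     if n < 0:
--         raise ValueError("nbc undefined for negative n")
--     total = 0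
--     while n > 1:
--         b = n.bit_length() - 1
--         n -= 1 << b
--         total += ((b << b) >> 1) + n
--     return total
-- ===== Notes on version B (the rewrite author's own statement) =====
-- stated objective: faster
-- what changed: A recurses on nbc(n-m)+nbc(m) making a number of calls linear in n; B iterates once over the set bits of n (O(log n) steps) using the closed form nbc(2^b) = b*2^(b-1) for each bit, plus the remainder term.
import Mathlib
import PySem

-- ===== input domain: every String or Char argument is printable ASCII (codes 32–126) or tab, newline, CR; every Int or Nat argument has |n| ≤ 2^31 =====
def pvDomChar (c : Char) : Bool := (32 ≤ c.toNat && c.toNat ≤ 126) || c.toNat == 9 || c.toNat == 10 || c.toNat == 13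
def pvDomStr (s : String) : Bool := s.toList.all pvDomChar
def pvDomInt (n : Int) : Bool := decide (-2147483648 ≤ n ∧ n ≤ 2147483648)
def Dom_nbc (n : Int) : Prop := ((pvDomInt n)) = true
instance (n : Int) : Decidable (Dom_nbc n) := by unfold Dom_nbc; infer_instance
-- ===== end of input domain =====

-- B replaces A's linear-call-count recursion by a loop over the set bits of n,
-- using the closed form nbc(2^b) = b*2^(b-1) for each bit (objective: faster, asymptotic).

-- ===== PORT A =====
-- the `while 2**(d+1) < n: d = d+1` loop of A; the fuel argument only makes the
-- recursion structural (fuel = n.toNat always suffices, proved in nbcFindD_spec below)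
def nbcFindD (fuel : Nat) (n : Int) (d : Nat) : Nat :=
  match fuel with
  | 0 => d
  | f + 1 => if (2:Int) ^ (d + 1) < n then nbcFindD f n (d + 1) else d

-- A's recursion, structural on a fuel bound (each recursive argument is < n, so fuel n.toNat+1 suffices)
def nbcF : Nat → Int → Int
  | 0, _ => 0
  | f + 1, n =>
    if n = 1 then 0
    else if n = 0 then 0
    else if n < 0 then 0  -- Python never returns here (unbounded recursion → RecursionError); outside Pre_
    else
      -- m = 2**d with d from the while loop, inlined
      nbcF f (n - 2 ^ nbcFindD n.toNat n 0) + nbcF f (2 ^ nbcFindD n.toNat n 0)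
        + (n - 2 ^ nbcFindD n.toNat n 0)

def nbc (n : Int) : Int := nbcF (n.toNat + 1) n

-- ===== PORT B =====
-- the `while n > 1:` loop of B; fuel = n.toNat suffices since n drops by at least 1 per step
def nbcAltGo : Nat → Int → Int → Int
  | 0, _, total => total
  | f + 1, n, total =>
    if n ≤ 1 then total
    else
      let b := Nat.log2 n.toNat            -- n.bit_length() - 1
      let n' := n - 2 ^ b                  -- n -= 1 << b
      nbcAltGo f n' (total + (((b <<< b) >>> 1 : Nat) : Int) + n')

def nbc_alt (n : Int) : Int :=
  if n < 0 then 0  -- Python raises ValueError here; outside Pre_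
  else nbcAltGo n.toNat n 0

-- ===== PRECONDITION & SPEC =====
-- Pre_ excludes exactly n < 0, where Python A never returns (RecursionError) and B raises ValueError.
def Pre_nbc (n : Int) : Prop := 0 ≤ n
instance (n : Int) : Decidable (Pre_nbc n) := by unfold Pre_nbc; infer_instance
def pvWitness_nbc : Int := (5)

def Spec_nbc (n : Int) (out : Int) : Prop := out = nbc_alt n
instance (n : Int) (out : Int) : Decidable (Spec_nbc n out) := by unfold Spec_nbc; infer_instance

-- ===== CLAIM (what is proved, stated in full; the proofs are below) =====
def Claim_equal_nbc : Prop := ∀ (n : Int), Dom_nbc n → Pre_nbc n → Spec_nbc n (nbc n)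

-- ===== LEMMAS AND PROOFS =====

-- the while loop of A finds THE d with 2^d < n ≤ 2^(d+1), provided enough fuel
theorem nbcFindD_spec (n : Int) : ∀ (fuel d : Nat), (2:Int) ^ d < n → n ≤ 2 ^ (d + fuel + 1) →
    (2:Int) ^ (nbcFindD fuel n d) < n ∧ n ≤ 2 ^ (nbcFindD fuel n d + 1) := by
  intro fuel
  induction fuel with
  | zero => intro d h hf; exact ⟨h, by simpa using hf⟩
  | succ f ih =>
    intro d h hf
    rw [nbcFindD]
    split
    · exact ih (d + 1) (by assumption) (by rw [show d + 1 + f + 1 = d + (f + 1) + 1 by omega]; exact hf)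
    · exact ⟨h, le_of_not_gt (by assumption)⟩

-- n ≤ 2^(n.toNat) for 0 ≤ n: the fuel bound used at every nbcFindD call site
theorem le_two_pow_toNat (n : Int) (hn : 0 ≤ n) : n ≤ (2:Int) ^ n.toNat := by
  have h := Nat.lt_two_pow_self (n := n.toNat)
  have := (Nat.cast_lt (α := Int)).2 h
  rw [Int.toNat_of_nonneg hn] at this
  push_cast at this
  omega

-- the loop invariant at the actual call site of nbcF (fuel n.toNat, d = 0), for n ≥ 2
theorem nbcFindD_call (n : Int) (hn : 2 ≤ n) :
    (2:Int) ^ (nbcFindD n.toNat n 0) < n ∧ n ≤ 2 ^ (nbcFindD n.toNat n 0 + 1) := by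
  refine nbcFindD_spec n n.toNat 0 (by simpa using (by omega : (1:Int) < n)) ?_
  calc n ≤ (2:Int) ^ n.toNat := le_two_pow_toNat n (by omega)
    _ ≤ 2 ^ (0 + n.toNat + 1) := pow_le_pow_right₀ (by norm_num) (by omega)

-- nbcF is fuel-stable: any fuel > n.toNat gives the same value
theorem nbcF_mono : ∀ (f g : Nat) (n : Int), n.toNat < f → n.toNat < g → nbcF f n = nbcF g n := by
  intro f
  induction f with
  | zero => intro g n hf _; omega
  | succ f ih =>
    intro g n hf hg
    match g, hg with
    | g + 1, hg =>
      rw [nbcF, nbcF]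
      by_cases h1 : n = 1
      · simp [h1]
      by_cases h0 : n = 0
      · simp [h0]
      by_cases hneg : n < 0
      · simp [h0, h1, hneg]
      · have hn2 : 2 ≤ n := by omega
        have hs := nbcFindD_call n hn2
        set e := nbcFindD n.toNat n 0 with he
        have hm1 : (1:Int) ≤ 2 ^ e := one_le_pow₀ (by norm_num)
        have hmn : (2:Int) ^ e < n := hs.1
        rw [if_neg h1, if_neg h0, if_neg hneg, if_neg h1, if_neg h0, if_neg hneg]
        rw [ih g (n - 2 ^ e) (by omega) (by omega), ih g ((2:Int) ^ e) (by omega) (by omega)]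

theorem nbc_zero : nbc 0 = 0 := by unfold nbc nbcF; norm_num

theorem nbc_one : nbc 1 = 0 := by unfold nbc nbcF; norm_num

-- one unfolding of A's recursion in terms of nbc itself, for n ≥ 2
theorem nbc_step (n : Int) (hn : 2 ≤ n) :
    nbc n = nbc (n - 2 ^ nbcFindD n.toNat n 0) + nbc (2 ^ nbcFindD n.toNat n 0)
      + (n - 2 ^ nbcFindD n.toNat n 0) := by
  have hs := nbcFindD_call n hn
  set e := nbcFindD n.toNat n 0 with he
  have hm1 : (1:Int) ≤ 2 ^ e := one_le_pow₀ (by norm_num)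
  have hmn : (2:Int) ^ e < n := hs.1
  show nbcF (n.toNat + 1) n = _
  rw [nbcF, if_neg (by omega), if_neg (by omega), if_neg (by omega), ← he]
  rw [nbcF_mono n.toNat ((n - 2 ^ e).toNat + 1) (n - 2 ^ e) (by omega) (by omega),
      nbcF_mono n.toNat (((2:Int) ^ e).toNat + 1) ((2:Int) ^ e) (by omega) (by omega)]
  rfl

-- Nat arithmetic behind the shift expression of B
theorem shift_half (b : Nat) : (b <<< b) >>> 1 = b * 2 ^ b / 2 := by
  simp [Nat.shiftLeft_eq, Nat.shiftRight_eq_div_pow]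

theorem shift_half_succ (b : Nat) :
    2 * ((b <<< b) >>> 1) + 2 ^ b = ((b + 1) <<< (b + 1)) >>> 1 := by
  rw [shift_half, shift_half]
  rcases b with _ | s
  · decide
  · have h1 : (s + 1) * 2 ^ (s + 1) = ((s + 1) * 2 ^ s) * 2 := by ring
    have h2 : (s + 1 + 1) * 2 ^ (s + 1 + 1) = ((s + 1 + 1) * 2 ^ (s + 1)) * 2 := by ring
    rw [h1, h2, Nat.mul_div_cancel _ (by omega), Nat.mul_div_cancel _ (by omega)]
    ring

-- closed form used by B: nbc on a power of two
theorem nbc_pow (b : Nat) : nbc ((2:Int) ^ b) = (((b <<< b) >>> 1 : Nat) : Int) := by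
  induction b with
  | zero => simpa using nbc_one
  | succ s ih =>
    have hge : (2:Int) ^ (s + 1) ≥ 2 := by
      calc (2:Int) = 2 ^ 1 := by norm_num
        _ ≤ 2 ^ (s + 1) := pow_le_pow_right₀ (by norm_num) (by omega)
    rw [nbc_step _ hge]
    have hs := nbcFindD_call ((2:Int) ^ (s + 1)) hge
    set e := nbcFindD ((2:Int) ^ (s + 1)).toNat ((2:Int) ^ (s + 1)) 0 with he
    have h1 : e < s + 1 := by
      have := hs.1
      exact (pow_lt_pow_iff_right₀ (by norm_num : (1:Int) < 2)).1 this
    have h2 : s + 1 ≤ e + 1 := by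
      have := hs.2
      exact (pow_le_pow_iff_right₀ (by norm_num : (1:Int) < 2)).1 this
    have heq : e = s := by omega
    rw [heq] at *
    have hsub : (2:Int) ^ (s + 1) - 2 ^ s = 2 ^ s := by ring
    simp only [hsub, ih]
    have := shift_half_succ s
    push_cast [← this]
    ring

-- main loop lemma: nbcAltGo accumulates nbc, for any sufficient fuel
theorem go_eq : ∀ (f : Nat) (n t : Int), n.toNat ≤ f → 0 ≤ n → nbcAltGo f n t = t + nbc n := by
  intro f
  induction f with
  | zero =>
    intro n t hk hn
    have : n = 0 := by omega
    subst this
    rw [nbcAltGo, nbc_zero]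
    ring
  | succ f ih =>
    intro n t hk hn
    by_cases h0 : n ≤ 1
    · rw [nbcAltGo, if_pos h0]
      interval_cases n
      · rw [nbc_zero]; ring
      · rw [nbc_one]; ring
    · rw [nbcAltGo, if_neg h0]
      set b := Nat.log2 n.toNat with hb
      have hnz : n.toNat ≠ 0 := by omega
      have hlo : 2 ^ b ≤ n.toNat := Nat.log2_self_le hnz
      have hhi : n.toNat < 2 ^ (b + 1) := Nat.lt_log2_self
      have hloI : (2:Int) ^ b ≤ n := by
        have := (Nat.cast_le (α := Int)).2 hlo
        rw [Int.toNat_of_nonneg hn] at this; push_cast at this; exact this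
      have hhiI : n < (2:Int) ^ (b + 1) := by
        have := (Nat.cast_lt (α := Int)).2 hhi
        rw [Int.toNat_of_nonneg hn] at this; push_cast at this; exact this
      have hpos : (0:Int) < 2 ^ b := by positivity
      have hstep : nbcAltGo f (n - 2 ^ b) (t + (((b <<< b) >>> 1 : Nat) : Int) + (n - 2 ^ b))
          = t + (((b <<< b) >>> 1 : Nat) : Int) + (n - 2 ^ b) + nbc (n - 2 ^ b) :=
        ih _ _ (by omega) (by omega)
      rw [hstep]
      by_cases hex : n = 2 ^ b
      · rw [hex]
        simp only [sub_self, nbc_zero, add_zero, nbc_pow b]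
      · -- 2^b < n: unfold A's recursion here and identify its split point with b
        have hlt : (2:Int) ^ b < n := lt_of_le_of_ne hloI (fun h => hex h.symm)
        have hn2 : (2:Int) ≤ n := by omega
        rw [nbc_step n hn2]
        have hs := nbcFindD_call n hn2
        set e := nbcFindD n.toNat n 0 with he
        have h1 : e ≤ b := by
          have : (2:Int) ^ e < 2 ^ (b + 1) := lt_of_lt_of_le hs.1 (le_of_lt hhiI)
          have := (pow_lt_pow_iff_right₀ (by norm_num : (1:Int) < 2)).1 this
          omega
        have h2 : b ≤ e := by
          have : (2:Int) ^ b < 2 ^ (e + 1) := lt_of_lt_of_le hlt hs.2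
          have := (pow_lt_pow_iff_right₀ (by norm_num : (1:Int) < 2)).1 this
          omega
        have heq : e = b := by omega
        rw [heq, nbc_pow b]
        ring

-- ===== VERDICT (by name: the statement is the Claim_ definition above) =====
theorem nbc_spec : Claim_equal_nbc := by
  intro n _ hpre
  unfold Pre_nbc at hpre
  unfold Spec_nbc nbc_alt
  rw [if_neg (by omega), go_eq n.toNat n 0 (le_refl _) hpre]
  ring
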